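-- pv_equiv track=rewrite | github.com/jgoheen/Daily-Coding-Problems | exercise159-recurring_characters.py | recurringChar
-- ===== SOURCE A (Python) =====
-- def recurringChar(s):
--     i = 0
--     j = 1
--     while j < len(s):
--         if s[i] == s[j]:
--             return((s[i]))
--             break
--         i += 1
--         j += 1
--     return "null"
-- ===== SOURCE B (Python) =====
-- def recurringChar(s):
--     # Divide and conquer: the leftmost adjacent-equal pair is either inside the
--     # left half (including the one pair straddling the midpoint) or inside the
--     # right half; halves overlap by one character so no pair is lost.
--     if len(s) < 2:
--         return "null"
--     if len(s) == 2:
--         return s[0] if s[0] == s[1] else "null"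
--     m = len(s) // 2
--     left = recurringChar(s[:m + 1])
--     if left != "null":
--         return left
--     return recurringChar(s[m:])
-- ===== Notes on version B (the rewrite author's own statement) =====
-- stated objective: alternative
-- what changed: Replaces the linear index-walking while-loop with a divide-and-conquer recursion: split the string at the midpoint into two halves overlapping by one character, solve the left half first (preserving leftmost-match order), then the right half.
import Mathlib
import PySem

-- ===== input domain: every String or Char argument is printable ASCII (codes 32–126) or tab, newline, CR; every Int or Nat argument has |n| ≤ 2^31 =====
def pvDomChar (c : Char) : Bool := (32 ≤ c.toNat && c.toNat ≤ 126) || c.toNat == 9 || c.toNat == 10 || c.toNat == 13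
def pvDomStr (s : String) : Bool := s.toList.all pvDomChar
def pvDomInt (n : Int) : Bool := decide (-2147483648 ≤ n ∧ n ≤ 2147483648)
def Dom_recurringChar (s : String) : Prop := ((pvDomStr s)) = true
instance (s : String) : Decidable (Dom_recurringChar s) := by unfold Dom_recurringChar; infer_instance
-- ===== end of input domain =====

-- B replaces A's linear two-index while-loop by a divide-and-conquer recursion on
-- halves overlapping by one character; same result, different algorithm (objective: alternative).
-- ===== PORT A =====
-- A's while-loop: indices i, j walk the string; return s[i] as a 1-char string on the first equal adjacent pair.
def rcLoop (cs : List Char) (i j : Nat) : String :=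
  if j < cs.length then
    if cs.getD i ' ' = cs.getD j ' ' then String.ofList [cs.getD i ' ']
    else rcLoop cs (i + 1) (j + 1)
  else "null"
termination_by cs.length - j

def recurringChar (s : String) : String := rcLoop s.toList 0 1

-- ===== PORT B =====
-- B: divide and conquer; s[:m+1] is List.take (m+1), s[m:] is List.drop m (both bounds are
-- nonnegative and at most the length, so Python's slices coincide with take/drop).
def rcDC (cs : List Char) : String :=
  if cs.length < 2 then "null"
  else if cs.length = 2 then
    (if cs.getD 0 ' ' = cs.getD 1 ' ' then String.ofList [cs.getD 0 ' '] else "null")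
  else
    let m := cs.length / 2
    let left := rcDC (cs.take (m + 1))
    if left ≠ "null" then left else rcDC (cs.drop m)
termination_by cs.length
decreasing_by
  · simp only [List.length_take]; omega
  · simp only [List.length_drop]; omega

def recurringChar_alt (s : String) : String := rcDC s.toList

-- ===== PRECONDITION & SPEC =====
def Spec_recurringChar (s : String) (out : String) : Prop := out = recurringChar_alt s
instance (s : String) (out : String) : Decidable (Spec_recurringChar s out) := by unfold Spec_recurringChar; infer_instance

-- ===== CLAIM (what is proved, stated in full; the proofs are below) =====
def Claim_equal_recurringChar : Prop := ∀ (s : String), Dom_recurringChar s → Spec_recurringChar s (recurringChar s)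

-- ===== LEMMAS AND PROOFS =====

-- common reference form: structural scan over adjacent pairs
def pairScan : List Char → String
  | a :: b :: t => if a = b then String.ofList [a] else pairScan (b :: t)
  | _ => "null"

theorem ofList_single_ne_null (a : Char) : String.ofList [a] ≠ "null" := by
  intro h
  have := congrArg String.length h
  rw [show ("null" : String).length = 4 from rfl] at this
  simp at this

theorem pairScan_split (m : Nat) : ∀ (cs : List Char), 1 ≤ m → m + 1 ≤ cs.length →
    pairScan cs =
      (if pairScan (cs.take (m + 1)) ≠ "null" then pairScan (cs.take (m + 1))
       else pairScan (cs.drop m)) := by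
  induction m with
  | zero => intro cs h1 _; omega
  | succ m ih =>
    intro cs _ h2
    rcases Nat.eq_zero_or_pos m with hm | hm
    · subst hm
      match cs, h2 with
      | a :: b :: t, _ =>
        by_cases hab : a = b
        · simp [pairScan, hab, ofList_single_ne_null]
        · simp [pairScan, hab]
    · match cs, h2 with
      | a :: b :: t, h2 =>
        simp only [List.length_cons] at h2
        have htake : (a :: b :: t).take (m + 1 + 1) = a :: (b :: t).take (m + 1) := by
          simp [List.take_succ_cons]
        have hdrop : (a :: b :: t).drop (m + 1) = (b :: t).drop m := by
          simp [List.drop_succ_cons]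
        have htake2 : (b :: t).take (m + 1) = b :: t.take m := by
          simp [List.take_succ_cons]
        by_cases hab : a = b
        · rw [htake, htake2]
          simp [pairScan, hab, ofList_single_ne_null]
        · have hscan : pairScan (a :: b :: t) = pairScan (b :: t) := by
            simp [pairScan, hab]
          have hscanT : pairScan (a :: (b :: t).take (m + 1)) = pairScan ((b :: t).take (m + 1)) := by
            rw [htake2]; simp [pairScan, hab]
          rw [hscan, htake, hscanT, hdrop]
          exact ih (b :: t) hm (by simpa using Nat.le_of_succ_le_succ h2)

theorem rcDC_eq_pairScan (cs : List Char) : rcDC cs = pairScan cs := by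
  fun_induction rcDC cs with
  | case1 cs h =>
    match cs, h with
    | [], _ => simp [pairScan]
    | [a], _ => simp [pairScan]
  | case2 cs h1 h2 heq =>
    match cs, h2 with
    | [a, b], _ =>
      simp at heq; simp [pairScan, heq]
  | case3 cs h1 h2 hne =>
    match cs, h2 with
    | [a, b], _ =>
      simp at hne; simp [pairScan, hne]
  | case4 cs h1 h2 m left hne ih =>
    have hm1 : 1 ≤ m := by simp only [m]; omega
    have hm2 : m + 1 ≤ cs.length := by simp only [m]; omega
    rw [pairScan_split m cs hm1 hm2]
    have hl : left = pairScan (cs.take (m + 1)) := ih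
    rw [← hl]
    simp [hne]
  | case5 cs h1 h2 m left hnn ih1 ih2 =>
    have hm1 : 1 ≤ m := by simp only [m]; omega
    have hm2 : m + 1 ≤ cs.length := by simp only [m]; omega
    rw [pairScan_split m cs hm1 hm2]
    have hl : left = pairScan (cs.take (m + 1)) := ih1
    rw [← hl]
    simp only [not_not] at hnn
    simp [hnn]
    exact ih2

theorem rcLoop_eq_pairScan (cs : List Char) : ∀ (i : Nat), rcLoop cs i (i + 1) = pairScan (cs.drop i) := by
  intro i
  generalize hm : cs.length - i = n at *
  induction n generalizing i with
  | zero =>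
    rw [rcLoop]
    have hlen : cs.length ≤ i := by omega
    have : cs.drop i = [] := List.drop_eq_nil_of_le hlen
    simp [this, pairScan]
    omega
  | succ n ih =>
    rw [rcLoop]
    by_cases hj : i + 1 < cs.length
    · have hi : i < cs.length := by omega
      have hdrop : cs.drop i = cs[i] :: cs.drop (i + 1) := List.drop_eq_getElem_cons hi
      have hdrop2 : cs.drop (i + 1) = cs[i + 1] :: cs.drop (i + 2) := List.drop_eq_getElem_cons hj
      rw [hdrop, hdrop2]
      simp only [hj, if_true, List.getD_eq_getElem cs ' ' hi, List.getD_eq_getElem cs ' ' hj]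
      by_cases heq : cs[i] = cs[i + 1]
      · simp [heq, pairScan]
      · simp only [heq, if_false, pairScan, ← hdrop2]
        exact ih (i + 1) (by omega)
    · simp only [hj, if_false]
      rcases Nat.lt_or_ge i cs.length with hi | hi
      · have : cs.drop i = [cs[i]] := by
          rw [List.drop_eq_getElem_cons hi, List.drop_eq_nil_of_le (by omega)]
        simp [this, pairScan]
      · simp [List.drop_eq_nil_of_le hi, pairScan]

-- ===== VERDICT (by name: the statement is the Claim_ definition above) =====
theorem recurringChar_spec : Claim_equal_recurringChar := by
  intro s _
  show recurringChar s = recurringChar_alt s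
  unfold recurringChar recurringChar_alt
  rw [rcDC_eq_pairScan]
  simpa using rcLoop_eq_pairScan s.toList 0
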